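-- pv_equiv track=rewrite | github.com/BlueEventHorizon/bw-cc-plugins | plugins/forge/skills/next-spec-id/scripts/scan_spec_ids.py | _normalize_glob_to_prefix
-- ===== SOURCE A (Python) =====
-- def _normalize_glob_to_prefix(pattern):
--     """glob パターンを git ls-tree 用のプレフィックスに変換する。
--
--     'docs/specs/**/design/' → 'docs/specs/'
--     'docs/specs/*/requirements/' → 'docs/specs/'
--     'specs/' → 'specs/'
--     """
--     parts = pattern.rstrip('/').split('/')
--     prefix_parts = []
--     for part in parts:
--         if '*' in part or '?' in part:
--             break
--         prefix_parts.append(part)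
--     if prefix_parts:
--         return '/'.join(prefix_parts) + '/'
--     return ''
-- ===== SOURCE B (Python) =====
-- def _normalize_glob_to_prefix(pattern):
--     s = pattern.rstrip('/')
--     i = -1
--     for k, ch in enumerate(s):
--         if ch == '*' or ch == '?':
--             i = k
--             break
--     if i == -1:
--         return s + '/'
--     j = s.rfind('/', 0, i)
--     return '' if j == -1 else s[:j] + '/'
-- ===== Notes on version B (the rewrite author's own statement) =====
-- stated objective: alternative
-- what changed: A splits the pattern into path segments and rejoins the leading wildcard-free ones; B never builds a segment list: it scans for the first wildcard character, then slices the string at the last separator before it (rfind).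
import Mathlib
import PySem

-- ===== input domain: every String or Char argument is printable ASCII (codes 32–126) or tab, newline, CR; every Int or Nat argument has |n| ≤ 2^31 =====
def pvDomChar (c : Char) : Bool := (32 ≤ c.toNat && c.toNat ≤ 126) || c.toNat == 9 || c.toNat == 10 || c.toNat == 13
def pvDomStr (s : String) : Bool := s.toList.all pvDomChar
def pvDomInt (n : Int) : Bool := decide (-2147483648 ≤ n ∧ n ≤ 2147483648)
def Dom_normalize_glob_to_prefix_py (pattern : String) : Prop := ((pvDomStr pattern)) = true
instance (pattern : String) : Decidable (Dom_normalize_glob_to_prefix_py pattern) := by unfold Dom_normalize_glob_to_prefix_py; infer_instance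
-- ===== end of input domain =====

-- B rewrites A's segment-splitting loop as a character scan: find the first wildcard,
-- then cut at the last '/' before it (objective: alternative decomposition, same cost).

-- shared helper: exact hand port of Python's str.rstrip('/') (both Pythons call this
-- builtin with the same argument; PySem.Chars.rstrip only strips whitespace)
def pyRstripSlash (cs : List Char) : List Char :=
  (cs.reverse.dropWhile (fun c => c == '/')).reverse

-- ===== PORT A =====
-- '*' in part or '?' in part
def partHasWildcard (part : List Char) : Bool :=
  PySem.Chars.isIn ['*'] part || PySem.Chars.isIn ['?'] part

-- the for-loop over parts with break, accumulating prefix_parts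
def collectPrefixParts : List (List Char) → List (List Char) → List (List Char)
  | [], acc => acc
  | part :: rest, acc =>
    if partHasWildcard part then acc
    else collectPrefixParts rest (acc ++ [part])

def normalize_glob_to_prefix_py (pattern : String) : String :=
  let parts := PySem.Chars.splitOn (pyRstripSlash pattern.toList) ['/']
  let prefix_parts := collectPrefixParts parts []
  if prefix_parts ≠ [] then String.ofList (PySem.Chars.join ['/'] prefix_parts ++ ['/'])
  else ""

-- ===== PORT B =====
-- the 'for k, ch in enumerate(s): if ch in "*?": break' scan; -1 if no wildcard
def findWildcardIdx : List Char → Int → Int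
  | [], _ => -1
  | ch :: rest, k => if ch == '*' || ch == '?' then k else findWildcardIdx rest (k + 1)

def normalize_glob_to_prefix_py_alt (pattern : String) : String :=
  let s := pyRstripSlash pattern.toList
  let i := findWildcardIdx s 0
  if i = -1 then String.ofList (s ++ ['/'])
  else
    let j := PySem.Chars.rfindFrom s ['/'] 0 (some i)
    if j = -1 then "" else String.ofList (PySem.List.slice s none (some j) ++ ['/'])

-- ===== PRECONDITION & SPEC =====
def Spec_normalize_glob_to_prefix_py (pattern : String) (out : String) : Prop := out = normalize_glob_to_prefix_py_alt pattern
instance (pattern : String) (out : String) : Decidable (Spec_normalize_glob_to_prefix_py pattern out) := by unfold Spec_normalize_glob_to_prefix_py; infer_instance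

-- ===== CLAIM (what is proved, stated in full; the proofs are below) =====
def Claim_equal_normalize_glob_to_prefix_py : Prop := ∀ (pattern : String), Dom_normalize_glob_to_prefix_py pattern → Spec_normalize_glob_to_prefix_py pattern (normalize_glob_to_prefix_py pattern)

-- ===== LEMMAS AND PROOFS =====

-- last index of c in u, -1 if absent (reference function for rfind on a single char)
def lastOcc : List Char → Char → Int
  | [], _ => -1
  | a :: rest, c =>
    let r := lastOcc rest c
    if 0 ≤ r then r + 1 else if a == c then 0 else -1

theorem lastOcc_append_singleton (v : List Char) (a c : Char) :
    lastOcc (v ++ [a]) c = if a == c then (v.length : Int) else lastOcc v c := by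
  induction v with
  | nil => simp [lastOcc]
  | cons b v ih =>
    simp only [List.cons_append, lastOcc, ih]
    by_cases h : a == c <;> simp [h] <;> split_ifs with h1 h2 <;> omega

theorem lastOcc_ge (u : List Char) (c : Char) : -1 ≤ lastOcc u c := by
  induction u with
  | nil => simp [lastOcc]
  | cons a rest ih => simp only [lastOcc]; split_ifs <;> omega

theorem lastOcc_neg_one_iff (u : List Char) (c : Char) : lastOcc u c = -1 ↔ c ∉ u := by
  induction u with
  | nil => simp [lastOcc]
  | cons a rest ih =>
    have hge := lastOcc_ge rest c
    simp only [lastOcc, List.mem_cons]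
    by_cases hr : 0 ≤ lastOcc rest c
    · have hc : c ∈ rest := by
        by_contra h
        have := ih.mpr h; omega
      rw [if_pos hr]
      constructor
      · intro h; omega
      · intro h; exact absurd (Or.inr hc) h
    · have hm1 : lastOcc rest c = -1 := by omega
      have hcr : c ∉ rest := ih.mp hm1
      rw [if_neg hr]
      by_cases hac : a == c
      · simp only [beq_iff_eq] at hac; subst hac; simp
      · simp only [beq_iff_eq] at hac
        simp only [beq_iff_eq, hcr, or_false, if_neg hac]
        exact iff_of_true trivial (fun h => hac (Eq.symm h))

theorem lastOcc_decomp (u : List Char) (c : Char) (h : c ∈ u) :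
    ∃ v w, u = v ++ c :: w ∧ c ∉ w ∧ lastOcc u c = (v.length : Int) := by
  induction u with
  | nil => simp at h
  | cons a rest ih =>
    by_cases hr : c ∈ rest
    · obtain ⟨v, w, hvw, hcw, hlast⟩ := ih hr
      refine ⟨a :: v, w, by simp [hvw], hcw, ?_⟩
      have h1 : ¬ lastOcc rest c = -1 := by simpa [lastOcc_neg_one_iff] using hr
      have h2 := lastOcc_ge rest c
      simp only [lastOcc, hlast]
      have h0 : (0:Int) ≤ (v.length : Int) := by positivity
      simp [h0]
    · rcases List.mem_cons.mp h with rfl | hm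
      · refine ⟨[], rest, rfl, hr, ?_⟩
        have h1 : lastOcc rest c = -1 := (lastOcc_neg_one_iff rest c).mpr hr
        simp [lastOcc, h1]
      · exact absurd hm hr

-- rfind.go on a one-char needle computes the last occurrence within u.take (k+1)
theorem rfind_go_single (u : List Char) (c : Char) :
    ∀ k, PySem.Chars.rfind.go u [c] k = lastOcc (u.take (k + 1)) c := by
  intro k
  induction k with
  | zero =>
    simp only [PySem.Chars.rfind.go]
    cases u with
    | nil => simp [lastOcc, List.isPrefixOf]
    | cons a rest =>
      by_cases h : c == a
      · simp only [beq_iff_eq] at h; subst h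
        simp [List.isPrefixOf, lastOcc]
      · have h' : ¬ ((a == c) = true) := by
          simp only [beq_iff_eq] at *; exact fun hh => h hh.symm
        simp [List.isPrefixOf, lastOcc, h, h']
  | succ j ih =>
    simp only [PySem.Chars.rfind.go]
    by_cases hlen : j + 1 < u.length
    · have hdrop : u.drop (j+1) = u[j+1] :: u.drop (j+2) := List.drop_eq_getElem_cons hlen
      have htake : u.take (j+1+1) = u.take (j+1) ++ [u[j+1]] := by
        rw [List.take_succ]; simp [List.getElem?_eq_getElem hlen]
      rw [htake, lastOcc_append_singleton]
      by_cases hc : (u[j+1] == c) = true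
      · have hpre : [c].isPrefixOf (u.drop (j+1)) = true := by
          rw [hdrop]
          simp only [List.isPrefixOf, Bool.and_true, List.isPrefixOf_nil_left]
          simp only [beq_iff_eq] at hc ⊢
          exact hc.symm
        have hlen' : (u.take (j+1)).length = j+1 := by
          simp [List.length_take]; omega
        simp [hpre, hc, hlen']
      · have hpre : ¬ ([c].isPrefixOf (u.drop (j+1)) = true) := by
          rw [hdrop]
          simp only [List.isPrefixOf, Bool.and_true, List.isPrefixOf_nil_left]
          simp only [beq_iff_eq] at hc ⊢
          exact fun h => hc h.symm
        simp [hpre, hc, ih]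
    · have h1 : u.drop (j + 1) = [] := List.drop_eq_nil_of_le (by omega)
      have h2 : u.take (j + 1 + 1) = u.take (j + 1) := by
        rw [List.take_of_length_le (by omega), List.take_of_length_le (by omega)]
      simp [h1, List.isPrefixOf, h2, ← ih]

theorem rfind_single (u : List Char) (c : Char) :
    PySem.Chars.rfind u [c] = lastOcc u c := by
  have h := rfind_go_single u c u.length
  rw [List.take_of_length_le (Nat.le_succ u.length)] at h
  simpa [PySem.Chars.rfind] using h

-- rfindFrom s [c] 0 (some i) for 0 ≤ i ≤ len s is the last occurrence before index i
theorem rfindFrom_single (s : List Char) (c : Char) (i : Int) (h0 : 0 ≤ i)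
    (hlen : i ≤ (s.length : Int)) :
    PySem.Chars.rfindFrom s [c] 0 (some i) = lastOcc (s.take i.toNat) c := by
  simp only [PySem.Chars.rfindFrom]
  have h1 : ¬ ((s.length : Int) < i) := by omega
  have h2 : ¬ (i < 0) := by omega
  have h3 : ¬ ((0:Int) < 0) := by omega
  simp only [h1, if_false, h2, h3]
  have h4 : ¬ (i < (0:Int)) := by omega
  simp only [h4, if_false, Int.toNat_zero, List.drop_zero, rfind_single]
  split_ifs with h5 <;> omega

theorem isPrefixOf_single_cons (c a : Char) (rest : List Char) :
    [c].isPrefixOf (a :: rest) = (c == a) := by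
  rw [List.isPrefixOf]; simp

theorem splitOnP_cons_decomp (p : Char → Bool) (l : List Char) :
    ∃ hd tl, List.splitOnP p l = hd :: tl := by
  cases h : List.splitOnP p l with
  | nil => exact absurd h (List.splitOnP_ne_nil p l)
  | cons hd tl => exact ⟨hd, tl, rfl⟩

-- splitOn.go on a one-char separator is List.splitOn with the accumulators flushed
theorem splitOn_go_single (c : Char) (fuel : Nat) :
    ∀ (l cur : List Char) (acc : List (List Char)), l.length ≤ fuel →
    PySem.Chars.splitOn.go [c] fuel l cur acc
      = acc.reverse ++ (l.splitOn c).modifyHead (fun x => cur.reverse ++ x) := by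
  induction fuel with
  | zero =>
    intro l cur acc h
    have hl : l = [] := by simpa using h
    subst hl
    rw [show PySem.Chars.splitOn.go [c] 0 [] cur acc
        = (((cur.reverse ++ [] : List Char)) :: acc).reverse from rfl]
    simp [List.splitOn, List.splitOnP_nil, List.modifyHead]
  | succ fuel ih =>
    intro l cur acc h
    cases l with
    | nil =>
      rw [show PySem.Chars.splitOn.go [c] (fuel + 1) [] cur acc
          = (cur.reverse :: acc).reverse from rfl]
      simp [List.splitOn, List.splitOnP_nil, List.modifyHead]
    | cons a rest =>
      simp only [PySem.Chars.splitOn.go]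
      obtain ⟨hd, tl, heq⟩ := splitOnP_cons_decomp (· == c) rest
      by_cases hac : [c].isPrefixOf (a :: rest) = true
      · have ha : a = c := by
          rw [isPrefixOf_single_cons, beq_iff_eq] at hac
          exact hac.symm
        rw [if_pos hac]
        have hrest : rest.length ≤ fuel := by simpa using h
        have hgo := ih rest [] (cur.reverse :: acc) hrest
        rw [show List.drop [c].length (a :: rest) = rest from rfl, hgo]
        simp [List.splitOn, List.splitOnP_cons, ha, heq, List.modifyHead]
      · have ha : ¬ ((a == c) = true) := by
          rw [isPrefixOf_single_cons, beq_iff_eq] at hac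
          simp only [beq_iff_eq]
          exact fun hh => hac hh.symm
        rw [if_neg hac]
        rw [ih rest (a :: cur) acc (by simpa using h)]
        simp [List.splitOn, List.splitOnP_cons, ha, heq, List.modifyHead]

theorem splitOn_single (t : List Char) (c : Char) :
    PySem.Chars.splitOn t [c] = t.splitOn c := by
  obtain ⟨hd, tl, heq⟩ := splitOnP_cons_decomp (· == c) t
  have h := splitOn_go_single c (t.length + 1) t [] [] (Nat.le_succ t.length)
  simpa [PySem.Chars.splitOn, List.splitOn, heq, List.modifyHead] using h

-- every piece of splitOnP is built from characters of the original list
theorem mem_splitOnP_sublist (p : Char → Bool) (l : List Char) :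
    ∀ x ∈ List.splitOnP p l, x.Sublist l := by
  induction l with
  | nil =>
    intro x hx
    simp [List.splitOnP_nil] at hx
    simp [hx]
  | cons a xs ih =>
    intro x hx
    rw [List.splitOnP_cons] at hx
    by_cases hp : p a = true
    · rw [if_pos hp] at hx
      rcases List.mem_cons.mp hx with rfl | hx
      · exact List.nil_sublist _
      · exact (ih x hx).cons a
    · rw [if_neg hp] at hx
      obtain ⟨hd, tl, heq⟩ := splitOnP_cons_decomp p xs
      rw [heq] at hx
      simp only [List.modifyHead, List.mem_cons] at hx
      rcases hx with rfl | hx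
      · exact (ih hd (heq ▸ List.mem_cons_self)).cons₂ a
      · exact (ih x (heq ▸ List.mem_cons_of_mem hd hx)).cons a

-- the first piece of splitOnP is the longest separator-free prefix
theorem splitOnP_head (p : Char → Bool) (l : List Char) :
    ∃ rest, List.splitOnP p l = l.takeWhile (fun a => !p a) :: rest := by
  induction l with
  | nil => exact ⟨[], by simp [List.splitOnP_nil]⟩
  | cons a xs ih =>
    by_cases h : p a = true
    · exact ⟨List.splitOnP p xs, by simp [List.splitOnP_cons, h]⟩
    · obtain ⟨rest, hr⟩ := ih
      exact ⟨rest, by simp [List.splitOnP_cons, h, hr, List.modifyHead]⟩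

-- splitting an explicit separator splits the two halves independently
theorem splitOn_append_sep (u v : List Char) (c : Char) :
    (u ++ c :: v).splitOn c = u.splitOn c ++ v.splitOn c := by
  simp only [List.splitOn]
  induction u with
  | nil => simp [List.splitOnP_cons, List.splitOnP_nil]
  | cons a u ih =>
    obtain ⟨hd, tl, heq⟩ := splitOnP_cons_decomp (· == c) u
    simp only [List.cons_append, List.splitOnP_cons]
    by_cases h : (a == c) = true
    · simp [h, ih]
    · simp [h, ih, heq, List.modifyHead]

-- collectPrefixParts is takeWhile on the no-wildcard predicate

theorem collectPrefixParts_eq (parts acc : List (List Char)) :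
    collectPrefixParts parts acc = acc ++ parts.takeWhile (fun p => !partHasWildcard p) := by
  induction parts generalizing acc with
  | nil => simp [collectPrefixParts]
  | cons part rest ih =>
    simp only [collectPrefixParts, List.takeWhile_cons]
    by_cases h : partHasWildcard part <;> simp [h, ih]

theorem partHasWildcard_iff (part : List Char) :
    partHasWildcard part = true ↔ '*' ∈ part ∨ '?' ∈ part := by
  simp [partHasWildcard, PySem.Chars.isIn_iff_infix, List.singleton_infix_iff]

theorem partHasWildcard_false (part : List Char)
    (h : ∀ ch ∈ part, (ch == '*' || ch == '?') = false) : partHasWildcard part = false := by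
  rw [Bool.eq_false_iff]
  intro hw
  rcases (partHasWildcard_iff part).mp hw with hm | hm
  · have := h _ hm; simp at this
  · have := h _ hm; simp at this

theorem findWildcardIdx_none (s : List Char)
    (h : ∀ ch ∈ s, (ch == '*' || ch == '?') = false) :
    ∀ k, findWildcardIdx s k = -1 := by
  induction s with
  | nil => intro k; rfl
  | cons ch rest ih =>
    intro k
    have hch := h ch List.mem_cons_self
    simp only [findWildcardIdx, hch, Bool.false_eq_true, if_false]
    exact ih (fun c hc => h c (List.mem_cons_of_mem _ hc)) (k + 1)

theorem findWildcardIdx_first (p : List Char) (w : Char) (q : List Char)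
    (hp : ∀ ch ∈ p, (ch == '*' || ch == '?') = false)
    (hw : (w == '*' || w == '?') = true) :
    ∀ k, findWildcardIdx (p ++ w :: q) k = k + (p.length : Int) := by
  induction p with
  | nil => intro k; simp [findWildcardIdx, hw]
  | cons a p ih =>
    intro k
    have ha := hp a List.mem_cons_self
    simp only [List.cons_append, findWildcardIdx, ha, Bool.false_eq_true, if_false]
    rw [ih (fun c hc => hp c (List.mem_cons_of_mem _ hc)) (k + 1)]
    push_cast [List.length_cons]
    ring

-- the two port bodies after substituting the common rstrip result
def aCore (t : List Char) : String :=
  if collectPrefixParts (PySem.Chars.splitOn t ['/']) [] ≠ [] then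
    String.ofList (PySem.Chars.join ['/'] (collectPrefixParts (PySem.Chars.splitOn t ['/']) []) ++ ['/'])
  else ""

def bCore (t : List Char) : String :=
  if findWildcardIdx t 0 = -1 then String.ofList (t ++ ['/'])
  else if PySem.Chars.rfindFrom t ['/'] 0 (some (findWildcardIdx t 0)) = -1 then ""
  else String.ofList (PySem.List.slice t none
    (some (PySem.Chars.rfindFrom t ['/'] 0 (some (findWildcardIdx t 0)))) ++ ['/'])

theorem wild_ne_slash (w : Char) (hw : (w == '*' || w == '?') = true) : w ≠ '/' := by
  rcases Bool.or_eq_true_iff.mp hw with h | h <;>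
    · simp only [beq_iff_eq] at h; subst h; decide

-- the separator-free head of a split whose source starts with a wildcard-bearing block
theorem head_takeWhile_mem (p : List Char) (w : Char) (q : List Char)
    (hp : '/' ∉ p) (hw : w ≠ '/') :
    w ∈ (p ++ w :: q).takeWhile (fun a => !(a == '/')) := by
  have h1 : (p ++ w :: q).takeWhile (fun a => !(a == '/'))
      = p ++ (w :: q).takeWhile (fun a => !(a == '/')) := by
    rw [List.takeWhile_append, if_pos]
    rw [List.takeWhile_eq_self_iff.mpr]
    intro x hx
    simp only [Bool.not_eq_eq_eq_not, Bool.not_true, beq_eq_false_iff_ne]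
    exact fun he => hp (he ▸ hx)
  rw [h1, List.takeWhile_cons, if_pos (by simpa using hw)]
  exact List.mem_append_right _ List.mem_cons_self

-- no-wildcard input: both sides give t ++ '/'
theorem core_eq_nowild (t : List Char)
    (hall : ∀ ch ∈ t, (ch == '*' || ch == '?') = false) : aCore t = bCore t := by
  unfold aCore bCore
  rw [findWildcardIdx_none t hall 0, if_pos rfl]
  rw [splitOn_single, collectPrefixParts_eq, List.nil_append]
  have hparts : ∀ part ∈ t.splitOn '/', (!partHasWildcard part) = true := by
    intro part hm
    have hsub : part.Sublist t := mem_splitOnP_sublist _ t part (by simpa [List.splitOn] using hm)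
    have hfa : partHasWildcard part = false :=
      partHasWildcard_false part (fun ch hch => hall ch (hsub.subset hch))
    simp [hfa]
  rw [List.takeWhile_eq_self_iff.mpr hparts]
  have hnil : t.splitOn '/' ≠ [] := by
    simpa [List.splitOn] using List.splitOnP_ne_nil (fun x => x == '/') t
  rw [if_pos hnil]
  have hj : PySem.Chars.join ['/'] (t.splitOn '/') = t := by
    simpa [PySem.Chars.join, List.splitOn] using List.intercalate_splitOn t '/'
  rw [hj]

-- wildcard input: both sides cut at the last '/' before the first wildcard
theorem core_eq_wild (p : List Char) (w : Char) (q : List Char)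
    (hp : ∀ ch ∈ p, (ch == '*' || ch == '?') = false)
    (hw : (w == '*' || w == '?') = true) :
    aCore (p ++ w :: q) = bCore (p ++ w :: q) := by
  have hwslash : w ≠ '/' := wild_ne_slash w hw
  unfold aCore bCore
  have hi : findWildcardIdx (p ++ w :: q) 0 = (p.length : Int) := by
    simpa using findWildcardIdx_first p w q hp hw 0
  rw [hi]
  have hne : ¬ ((p.length : Int) = -1) := by
    have := Int.natCast_nonneg p.length; omega
  rw [if_neg hne]
  have hr : PySem.Chars.rfindFrom (p ++ w :: q) ['/'] 0 (some (p.length : Int))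
      = lastOcc p '/' := by
    rw [rfindFrom_single (p ++ w :: q) '/' (p.length : Int) (Int.natCast_nonneg _)
      (by simp [List.length_append]; omega)]
    rw [Int.toNat_natCast, List.take_left]
  rw [hr]
  rw [splitOn_single, collectPrefixParts_eq, List.nil_append]
  by_cases hs : '/' ∈ p
  · -- a '/' precedes the first wildcard: both sides return the prefix up to it
    obtain ⟨v, w₂, hpv, hw₂, hlast⟩ := lastOcc_decomp p '/' hs
    rw [hlast]
    have hvne : ¬ ((v.length : Int) = -1) := by
      have := Int.natCast_nonneg v.length; omega
    rw [if_neg hvne]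
    have ht : p ++ w :: q = v ++ '/' :: (w₂ ++ w :: q) := by
      rw [hpv]; simp
    rw [PySem.List.slice_to _ (Int.natCast_nonneg _), Int.toNat_natCast, ht, List.take_left]
    rw [splitOn_append_sep]
    obtain ⟨rest, hhead⟩ := splitOnP_head (fun x => x == '/') (w₂ ++ w :: q)
    have hsplit2 : (w₂ ++ w :: q).splitOn '/'
        = (w₂ ++ w :: q).takeWhile (fun a => !(a == '/')) :: rest := by
      simpa [List.splitOn] using hhead
    rw [hsplit2]
    have hwin : w ∈ (w₂ ++ w :: q).takeWhile (fun a => !(a == '/')) :=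
      head_takeWhile_mem w₂ w q hw₂ hwslash
    have hheadwild : partHasWildcard ((w₂ ++ w :: q).takeWhile (fun a => !(a == '/'))) = true := by
      rw [partHasWildcard_iff]
      rcases Bool.or_eq_true_iff.mp hw with h | h <;> simp only [beq_iff_eq] at h
      · exact Or.inl (h ▸ hwin)
      · exact Or.inr (h ▸ hwin)
    have hvparts : ∀ part ∈ v.splitOn '/', (!partHasWildcard part) = true := by
      intro part hm
      have hsub : part.Sublist v := mem_splitOnP_sublist _ v part (by simpa [List.splitOn] using hm)
      have hfa : partHasWildcard part = false :=
        partHasWildcard_false part (fun ch hch =>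
          hp ch (hpv ▸ List.mem_append_left _ (hsub.subset hch)))
      simp [hfa]
    have htw : List.takeWhile (fun pt => !partHasWildcard pt)
        (v.splitOn '/' ++ ((w₂ ++ w :: q).takeWhile (fun a => !(a == '/')) :: rest))
        = v.splitOn '/' := by
      rw [List.takeWhile_append, List.takeWhile_eq_self_iff.mpr hvparts, if_pos rfl,
        List.takeWhile_cons, if_neg (by simp [hheadwild]), List.append_nil]
    rw [htw]
    have hnil : v.splitOn '/' ≠ [] := by
      simpa [List.splitOn] using List.splitOnP_ne_nil (fun x => x == '/') v
    rw [if_pos hnil]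
    have hj : PySem.Chars.join ['/'] (v.splitOn '/') = v := by
      simpa [PySem.Chars.join, List.splitOn] using List.intercalate_splitOn v '/'
    rw [hj]
  · -- no '/' before the first wildcard: both sides return ''
    rw [(lastOcc_neg_one_iff p '/').mpr hs, if_pos rfl]
    obtain ⟨rest, hhead⟩ := splitOnP_head (fun x => x == '/') (p ++ w :: q)
    have hsplit : (p ++ w :: q).splitOn '/'
        = (p ++ w :: q).takeWhile (fun a => !(a == '/')) :: rest := by
      simpa [List.splitOn] using hhead
    rw [hsplit]
    have hwin : w ∈ (p ++ w :: q).takeWhile (fun a => !(a == '/')) :=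
      head_takeWhile_mem p w q hs hwslash
    have hheadwild : partHasWildcard ((p ++ w :: q).takeWhile (fun a => !(a == '/'))) = true := by
      rw [partHasWildcard_iff]
      rcases Bool.or_eq_true_iff.mp hw with h | h <;> simp only [beq_iff_eq] at h
      · exact Or.inl (h ▸ hwin)
      · exact Or.inr (h ▸ hwin)
    rw [List.takeWhile_cons, if_neg (by simp [hheadwild])]

theorem core_eq (t : List Char) : aCore t = bCore t := by
  cases hdw : t.dropWhile (fun ch => !(ch == '*' || ch == '?')) with
  | nil =>
    have hall := List.dropWhile_eq_nil_iff.mp hdw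
    exact core_eq_nowild t (fun ch hc => by simpa using hall ch hc)
  | cons w q =>
    have ht : t = t.takeWhile (fun ch => !(ch == '*' || ch == '?')) ++ w :: q := by
      conv_lhs => rw [← List.takeWhile_append_dropWhile
        (p := fun ch => !(ch == '*' || ch == '?')) (l := t)]
      rw [hdw]
    have hw : (w == '*' || w == '?') = true := by
      have h := List.head?_dropWhile_not (fun ch => !(ch == '*' || ch == '?')) t
      rw [hdw] at h
      simp only [List.head?_cons] at h
      cases hb : (w == '*' || w == '?')
      · exfalso; rw [hb] at h; simp at h
      · rfl
    have hpmem : ∀ ch ∈ t.takeWhile (fun ch => !(ch == '*' || ch == '?')),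
        (ch == '*' || ch == '?') = false := fun ch h => by
      simpa using List.mem_takeWhile_imp h
    rw [ht]
    exact core_eq_wild _ w q hpmem hw

-- ===== VERDICT (by name: the statement is the Claim_ definition above) =====
theorem normalize_glob_to_prefix_py_spec : Claim_equal_normalize_glob_to_prefix_py := by
  intro pattern _
  unfold Spec_normalize_glob_to_prefix_py
  have ha : normalize_glob_to_prefix_py pattern = aCore (pyRstripSlash pattern.toList) := rfl
  have hb : normalize_glob_to_prefix_py_alt pattern = bCore (pyRstripSlash pattern.toList) := rfl
  rw [ha, hb, core_eq]
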